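-- pv_equiv track=rewrite | github.com/josephxwang/aoc23 | 4.py | part1
-- ===== SOURCE A (Python) =====
-- def part1(lines):
--     sum = 0
--     for l in lines:
--         x, y = l.split('|')
--         x = x.split()
--         y = y.split()
--         n = len(set(x) & set(y))
--         if n > 0:
--             sum += 2**(n-1)
--     return sum
-- ===== SOURCE B (Python) =====
-- def part1(lines):
--     total = 0
--     for l in lines:
--         left, right = l.split('|')
--         winning = set(left.split())
--         points = 0
--         seen = set()
--         for tok in right.split():
--             if tok in winning and tok not in seen:
--                 seen.add(tok)
--                 points = 1 if points == 0 else 2 * points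
--         total += points
--     return total
-- ===== Notes on version B (the rewrite author's own statement) =====
-- stated objective: alternative
-- what changed: Replaces A's set-intersection count followed by the closed form 2**(n-1) with a single pass over the held tokens that doubles a running points accumulator on each new matching token (dedup via a seen set).
import Mathlib
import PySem

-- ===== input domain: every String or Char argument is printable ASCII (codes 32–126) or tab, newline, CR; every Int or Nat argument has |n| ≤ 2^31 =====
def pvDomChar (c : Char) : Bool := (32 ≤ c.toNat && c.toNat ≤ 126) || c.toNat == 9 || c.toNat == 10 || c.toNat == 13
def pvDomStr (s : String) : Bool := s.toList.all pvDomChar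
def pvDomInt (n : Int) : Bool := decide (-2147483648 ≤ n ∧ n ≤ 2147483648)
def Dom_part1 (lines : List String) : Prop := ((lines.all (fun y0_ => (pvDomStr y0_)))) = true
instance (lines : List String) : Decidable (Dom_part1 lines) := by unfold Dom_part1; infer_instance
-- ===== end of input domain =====

-- B replaces A's "count the set intersection, then 2**(n-1)" closed form with a single pass over
-- the held tokens that doubles a running points accumulator on each new matching token.

-- ===== PORT A =====
-- A: for each line, x, y = l.split('|'); n = len(set(x.split()) & set(y.split())); if n > 0: sum += 2**(n-1)
def part1 (lines : List String) : Int :=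
  lines.foldl (fun sum l =>
    match PySem.Str.split? l "|" with
    | some [x, y] =>
      let xs := PySem.Str.split₀ x
      let ys := PySem.Str.split₀ y
      let n : Int := PySem.Set.len (PySem.Set.inter (PySem.Set.ofList xs) (PySem.Set.ofList ys))
      if n > 0 then sum + 2 ^ (n - 1).toNat else sum
    | _ => sum)   -- unreachable under Pre_part1 (exactly one '|' per line; split? is some for sep ≠ "")
    0

-- ===== PORT B =====
-- B: winning = set(left.split()); points doubles (starting at 1) on each held token newly seen in winning
def part1_alt (lines : List String) : Int :=
  lines.foldl (fun total l =>
    let ps := (PySem.Str.split? l "|").getD []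
    if ps.length = 2 then
      let left := ps.getD 0 ""
      let right := ps.getD 1 ""
      let winning : PySem.Set String := PySem.Set.ofList (PySem.Str.split₀ left)
      let res := (PySem.Str.split₀ right).foldl
        (fun (st : Int × PySem.Set String) tok =>
          if winning.contains tok && !(st.2.contains tok) then
            (if st.1 = 0 then 1 else 2 * st.1, st.2.add tok)
          else st)
        (0, PySem.Set.empty)
      total + res.1
    else total)   -- unreachable under Pre_part1 (every line has exactly one '|')
    0

-- ===== PRECONDITION & SPEC =====
-- A unpacks l.split('|') into exactly two variables, so it raises ValueError unless every line
-- contains exactly one '|'; Pre_ admits exactly the lines with one '|'.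
def Pre_part1 (lines : List String) : Prop :=
  ∀ l ∈ lines, (PySem.Str.split? l "|").map List.length = some 2
instance (lines : List String) : Decidable (Pre_part1 lines) := by unfold Pre_part1; infer_instance

def pvWitness_part1 : List String :=
  ["Card 1: 41 48 83 86 17 | 83 86 6 31 17 9 48 53", "Card 2: 1 2 | 3 4"]

def Spec_part1 (lines : List String) (out : Int) : Prop := out = part1_alt lines
instance (lines : List String) (out : Int) : Decidable (Spec_part1 lines out) := by unfold Spec_part1; infer_instance

-- ===== CLAIM (what is proved, stated in full; the proofs are below) =====
def Claim_equal_part1 : Prop := ∀ (lines : List String), Dom_part1 lines → Pre_part1 lines → Spec_part1 lines (part1 lines)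

-- ===== LEMMAS AND PROOFS =====

-- score as a function of the number of matches: 0 on 0 matches, 2^(k-1) otherwise
def pvScore (k : Nat) : Int := if k = 0 then 0 else 2 ^ (k - 1)

theorem pvScore_succ (k : Nat) : pvScore (k + 1) = if pvScore k = 0 then 1 else 2 * pvScore k := by
  unfold pvScore
  rcases Nat.eq_zero_or_pos k with h | h
  · subst h; simp
  · have hk : k ≠ 0 := by omega
    have h2 : (2 : Int) ^ (k - 1) ≠ 0 := by positivity
    rw [if_neg (by omega : ¬ k + 1 = 0), if_neg hk, if_neg h2, Nat.add_sub_cancel,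
      ← pow_succ' (2 : Int) (k - 1)]
    congr 1
    omega

-- invariant of B's inner loop: starting from (pvScore s.length, s), after ts the state is
-- (pvScore S.length, S) with S = s.update (ts.filter (· ∈ winning))
theorem pvInner (winning : PySem.Set String) (ts : List String) :
    ∀ s : PySem.Set String,
      ts.foldl
        (fun (st : Int × PySem.Set String) tok =>
          if winning.contains tok && !(st.2.contains tok) then
            (if st.1 = 0 then 1 else 2 * st.1, st.2.add tok)
          else st)
        (pvScore s.length, s)
      = (pvScore (PySem.Set.update s (ts.filter (fun t => winning.contains t))).length,
         PySem.Set.update s (ts.filter (fun t => winning.contains t))) := by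
  induction ts with
  | nil => intro s; simp [PySem.Set.update]
  | cons t ts ih =>
    intro s
    by_cases hw : t ∈ winning
    · by_cases hs : t ∈ s
      · have hadd : PySem.Set.add s t = s := by
          simp [PySem.Set.add, hs]
        rw [List.foldl_cons, if_neg (by simp [hw, hs]), List.filter_cons_of_pos (by simp [hw])]
        simp only [PySem.Set.update, List.foldl_cons, hadd]
        exact ih s
      · have hlen : (PySem.Set.add s t).length = s.length + 1 := by
          simp [PySem.Set.add_of_not_mem hs]
        rw [List.foldl_cons, if_pos (by simp [hw, hs]), ← pvScore_succ, ← hlen,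
          List.filter_cons_of_pos (by simp [hw])]
        simp only [PySem.Set.update, List.foldl_cons]
        exact ih (PySem.Set.add s t)
    · rw [List.foldl_cons, if_neg (by simp [hw]), List.filter_cons_of_neg (by simp [hw])]
      exact ih s

-- the two ways of counting the matches agree: |set(xs) ∩ set(ys)| = |set(ys tokens in set(xs))|
theorem pvCard (xs ys : List String) :
    (PySem.Set.inter (PySem.Set.ofList xs) (PySem.Set.ofList ys)).length
      = (PySem.Set.ofList (ys.filter (fun t => (PySem.Set.ofList xs).contains t))).length := by
  apply List.Perm.length_eq
  rw [List.perm_ext_iff_of_nodup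
    (PySem.Set.nodup_inter _ _ (PySem.Set.nodup_ofList xs)) (PySem.Set.nodup_ofList _)]
  intro a
  simp [PySem.Set.mem_inter, PySem.Set.mem_ofList, List.mem_filter]
  tauto

-- per-line agreement of the two step functions on a line whose split has exactly two pieces
theorem pvLine (x y : String) (acc : Int) :
    (if PySem.Set.len (PySem.Set.inter (PySem.Set.ofList (PySem.Str.split₀ x))
          (PySem.Set.ofList (PySem.Str.split₀ y))) > 0 then
       acc + 2 ^ (PySem.Set.len (PySem.Set.inter (PySem.Set.ofList (PySem.Str.split₀ x))
          (PySem.Set.ofList (PySem.Str.split₀ y))) - 1).toNat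
     else acc)
    = acc + ((PySem.Str.split₀ y).foldl
        (fun (st : Int × PySem.Set String) tok =>
          if (PySem.Set.ofList (PySem.Str.split₀ x)).contains tok && !(st.2.contains tok) then
            (if st.1 = 0 then 1 else 2 * st.1, st.2.add tok)
          else st)
        (0, PySem.Set.empty)).1 := by
  have hB := pvInner (PySem.Set.ofList (PySem.Str.split₀ x)) (PySem.Str.split₀ y)
      (PySem.Set.empty)
  rw [show pvScore (List.length (PySem.Set.empty : PySem.Set String)) = 0 from rfl] at hB
  rw [hB]
  rw [show (PySem.Set.empty : PySem.Set String) = ([] : List String) from rfl,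
    PySem.Set.update_nil_left]
  have hcard := pvCard (PySem.Str.split₀ x) (PySem.Str.split₀ y)
  simp only [PySem.Set.len, hcard]
  set k := (PySem.Set.ofList
      ((PySem.Str.split₀ y).filter
        (fun t => (PySem.Set.ofList (PySem.Str.split₀ x)).contains t))).length with hk
  rcases Nat.eq_zero_or_pos k with h0 | hpos
  · simp [h0, pvScore]
  · have h1 : (0 : Int) < (k : Int) := by exact_mod_cast hpos
    rw [if_pos h1]
    unfold pvScore
    rw [if_neg (by omega : ¬ k = 0)]
    congr 2
    omega

-- ===== VERDICT (by name: the statement is the Claim_ definition above) =====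
theorem part1_spec : Claim_equal_part1 := by
  intro lines _ hpre
  unfold Spec_part1 part1 part1_alt
  apply PySem.List.foldl_congr_mem
  intro acc l hl
  have hsplit := hpre l hl
  obtain ⟨x, y, h⟩ : ∃ x y, PySem.Str.split? l "|" = some [x, y] := by
    rcases hps : PySem.Str.split? l "|" with _ | ps
    · rw [hps] at hsplit; simp at hsplit
    · rw [hps] at hsplit
      simp only [Option.map_some, Option.some.injEq] at hsplit
      rcases ps with _ | ⟨x, _ | ⟨y, _ | ⟨z, rest⟩⟩⟩
      · simp at hsplit
      · simp at hsplit
      · exact ⟨x, y, rfl⟩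
      · simp at hsplit
  simp only [h]
  exact pvLine x y acc
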